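-- pv_equiv track=rewrite | github.com/ryotgm0417/rc-bootcamp | src/data/01_python_basics/04_10.py | solution
-- ===== SOURCE A (Python) =====
-- def solution(arr):
--     counter = {}
--     for val in arr:
--         if val not in counter:
--             counter[val] = 1
--         else:
--             counter[val] += 1
--     acc = []
--     for key, val in counter.items():
--         acc.append(key + val)
--     return max(acc)
-- ===== SOURCE B (Python) =====
-- def solution(arr):
--     s = sorted(arr)
--     n = len(s)
--     acc = []
--     i = 0
--     while i < n:
--         v = s[i]
--         j = i + 1
--         while j < n and s[j] == v:
--             j += 1
--         acc.append(v + (j - i))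
--         i = j
--     return max(acc)
-- ===== Notes on version B (the rewrite author's own statement) =====
-- stated objective: alternative
-- what changed: Replaces the hash-count dict with sorted(arr) plus a single left-to-right scan that groups maximal runs of equal elements, taking the max of value + run length.
import Mathlib
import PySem

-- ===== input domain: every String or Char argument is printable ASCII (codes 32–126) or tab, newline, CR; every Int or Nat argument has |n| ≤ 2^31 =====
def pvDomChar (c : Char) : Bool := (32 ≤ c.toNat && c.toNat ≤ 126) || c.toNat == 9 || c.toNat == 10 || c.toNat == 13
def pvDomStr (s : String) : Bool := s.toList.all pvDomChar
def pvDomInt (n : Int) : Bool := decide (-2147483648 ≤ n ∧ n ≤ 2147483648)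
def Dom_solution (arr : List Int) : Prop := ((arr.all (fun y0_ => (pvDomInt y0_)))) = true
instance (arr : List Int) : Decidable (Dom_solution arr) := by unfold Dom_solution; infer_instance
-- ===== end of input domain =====

-- B replaces the hash-count dict with sorted(arr) plus one run-grouping scan (alternative algorithm, similar cost).

-- ===== PORT A =====
def solution (arr : List Int) : Int :=
  let counter : PySem.Dict Int Int :=
    arr.foldl (fun c val =>
      if ¬ c.contains val then c.insert val 1
      else c.modify val 0 (· + 1)) PySem.Dict.empty
  let acc : List Int := counter.items.foldl (fun a kv => a ++ [kv.1 + kv.2]) []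
  (PySem.List.max? acc (fun x => x)).getD 0

-- ===== PORT B =====
-- inner `while j < n and s[j] == v: j += 1`
def runEnd (s : List Int) (v : Int) (j : Nat) : Nat :=
  if _h : j < s.length ∧ s.getD j 0 == v then runEnd s v (j + 1) else j
termination_by s.length - j
decreasing_by omega

-- needed only for runScan's termination
theorem runEnd_ge (s : List Int) (v : Int) (j : Nat) : j ≤ runEnd s v j := by
  fun_induction runEnd s v j with
  | case1 j h ih => omega
  | case2 j h => omega

-- outer `while i < n:` loop
def runScan (s : List Int) (i : Nat) (acc : List Int) : List Int :=
  if _h : i < s.length then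
    let v := s.getD i 0
    let j := runEnd s v (i + 1)
    runScan s j (acc ++ [v + ((j : Int) - (i : Int))])
  else acc
termination_by s.length - i
decreasing_by have := runEnd_ge s (s.getD i 0) (i + 1); omega

def solution_alt (arr : List Int) : Int :=
  let s := PySem.List.sorted arr (fun x => x)
  let acc := runScan s 0 []
  (PySem.List.max? acc (fun x => x)).getD 0

-- ===== PRECONDITION & SPEC =====
-- Pre_ excludes only the empty list, on which A raises ValueError (max of an empty sequence).
def Pre_solution (arr : List Int) : Prop := arr ≠ []
instance (arr : List Int) : Decidable (Pre_solution arr) := by unfold Pre_solution; infer_instance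
def pvWitness_solution : List Int := ([1, 2, 2])

def Spec_solution (arr : List Int) (out : Int) : Prop := out = solution_alt arr
instance (arr : List Int) (out : Int) : Decidable (Spec_solution arr out) := by unfold Spec_solution; infer_instance

-- ===== CLAIM (what is proved, stated in full; the proofs are below) =====
def Claim_equal_solution : Prop := ∀ (arr : List Int), Dom_solution arr → Pre_solution arr → Spec_solution arr (solution arr)

-- ===== LEMMAS AND PROOFS =====

-- the run-grouping pass, as a structural recursion on the remaining suffix
def pvG : List Int → List Int
  | [] => []
  | v :: t => (v + 1 + ((t.takeWhile (· == v)).length : Int)) :: pvG (t.dropWhile (· == v))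
termination_by s => s.length
decreasing_by simpa using Nat.lt_succ_of_le (List.length_dropWhile_le _ _)

theorem pv_dropWhile_eq_drop (p : Int → Bool) (t : List Int) :
    t.dropWhile p = t.drop (t.takeWhile p).length := by
  induction t with
  | nil => simp
  | cons x xs ih =>
    by_cases hx : p x
    · simp [List.dropWhile, List.takeWhile, hx, ih]
    · simp [List.dropWhile, List.takeWhile, hx]

theorem runEnd_eq (s : List Int) (v : Int) (j : Nat) :
    runEnd s v j = j + ((s.drop j).takeWhile (· == v)).length := by
  fun_induction runEnd s v j with
  | case1 j h ih =>
    obtain ⟨hj, hv⟩ := h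
    have hdrop : s.drop j = s[j] :: s.drop (j + 1) := List.drop_eq_getElem_cons hj
    have : s.getD j 0 = s[j] := List.getD_eq_getElem s 0 hj
    rw [ih, hdrop]
    simp only [List.takeWhile]
    rw [this] at hv
    simp [hv]; omega
  | case2 j h =>
    by_cases hj : j < s.length
    · have hv : ¬ (s.getD j 0 == v) := by tauto
      have hdrop : s.drop j = s[j] :: s.drop (j + 1) := List.drop_eq_getElem_cons hj
      have hg : s.getD j 0 = s[j] := List.getD_eq_getElem s 0 hj
      rw [hdrop]
      simp only [List.takeWhile]
      rw [hg] at hv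
      simp [hv]
    · have : s.drop j = [] := List.drop_eq_nil_of_le (by omega)
      simp [this]

theorem runScan_eq (s : List Int) (i : Nat) (acc : List Int) :
    runScan s i acc = acc ++ pvG (s.drop i) := by
  fun_induction runScan s i acc with
  | case1 i acc h v j ih =>
    have hdrop : s.drop i = s[i] :: s.drop (i + 1) := List.drop_eq_getElem_cons h
    have hg : v = s[i] := List.getD_eq_getElem s 0 h
    have hje : j = (i + 1) + ((s.drop (i + 1)).takeWhile (· == v)).length := runEnd_eq s v (i + 1)
    rw [ih, hdrop]
    rw [pvG]
    have hdw : (s.drop (i + 1)).dropWhile (· == s[i]) = s.drop j := by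
      rw [pv_dropWhile_eq_drop, List.drop_drop]
      rw [hg] at hje
      congr 1
      omega
    rw [hdw, ← hg]
    have hval : v + ((j : Int) - (i : Int)) = v + 1 + (((s.drop (i + 1)).takeWhile (· == v)).length : Int) := by
      have : (j : Int) = (i : Int) + 1 + (((s.drop (i + 1)).takeWhile (· == v)).length : Int) := by
        rw [hje]; push_cast; ring
      rw [this]; ring
    rw [hval]
    simp
  | case2 i acc h =>
    have : s.drop i = [] := List.drop_eq_nil_of_le (by omega)
    simp [this, pvG]

theorem mem_pvG (s : List Int) (hs : s.Pairwise (· ≤ ·)) (a : Int) :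
    a ∈ pvG s ↔ ∃ v ∈ s, a = v + (s.count v : Int) := by
  induction s using pvG.induct with
  | case1 => simp [pvG]
  | case2 v t ih =>
    have htw : ∀ x ∈ t.takeWhile (· == v), x = v := by
      intro x hx
      have := List.mem_takeWhile_imp hx
      exact (beq_iff_eq).mp this
    have hsplit : t = t.takeWhile (· == v) ++ t.dropWhile (· == v) := (List.takeWhile_append_dropWhile).symm
    have hvle : ∀ x ∈ t, v ≤ x := (List.pairwise_cons.mp hs).1
    have hst : t.Pairwise (· ≤ ·) := (List.pairwise_cons.mp hs).2
    have hsd : (t.dropWhile (· == v)).Pairwise (· ≤ ·) := hst.sublist (List.dropWhile_sublist _)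
    have hgt : ∀ x ∈ t.dropWhile (· == v), v < x := by
      intro x hx
      rcases hd : t.dropWhile (· == v) with _ | ⟨h0, t0⟩
      · rw [hd] at hx; simp at hx
      · have hh0 : ¬ ((h0 == v) = true) := by
          have := List.head?_dropWhile_not (· == v) t
          rw [hd] at this; simpa using this
        have hh0v : h0 ≠ v := by simpa using hh0
        have hh0t : h0 ∈ t := (List.dropWhile_sublist (l := t) (p := (· == v))).mem (by rw [hd]; simp)
        have hvh0 : v < h0 := lt_of_le_of_ne (hvle h0 hh0t) (Ne.symm hh0v)
        rw [hd] at hx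
        rcases List.mem_cons.mp hx with rfl | hx0
        · exact hvh0
        · have : h0 ≤ x := by
            rw [hd] at hsd
            exact (List.pairwise_cons.mp hsd).1 x hx0
          omega
    have hcv : ((v :: t).count v : Int) = 1 + ((t.takeWhile (· == v)).length : Int) := by
      have h1 : t.count v = (t.takeWhile (· == v)).count v + (t.dropWhile (· == v)).count v := by
        conv_lhs => rw [hsplit]
        exact List.count_append ..
      have h2 : (t.takeWhile (· == v)).count v = (t.takeWhile (· == v)).length :=
        List.count_eq_length.mpr (fun x hx => by rw [htw x hx])
      have h3 : (t.dropWhile (· == v)).count v = 0 :=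
        List.count_eq_zero.mpr (fun hmem => lt_irrefl v (hgt v hmem))
      rw [List.count_cons_self, h1, h2, h3]
      push_cast; ring
    have hcu : ∀ u ∈ t.dropWhile (· == v), (v :: t).count u = (t.dropWhile (· == v)).count u := by
      intro u hu
      have huv : u ≠ v := fun he => lt_irrefl v (he ▸ hgt u hu)
      have h1 : (t.takeWhile (· == v)).count u = 0 :=
        List.count_eq_zero.mpr (fun hmem => huv (htw u hmem))
      have h2 : (v :: t).count u = t.count u := List.count_cons_of_ne (fun he => huv he.symm)
      rw [h2]
      conv_lhs => rw [hsplit]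
      rw [List.count_append, h1]
      omega
    constructor
    · intro ha
      rw [pvG] at ha
      rcases List.mem_cons.mp ha with rfl | ha0
      · exact ⟨v, List.mem_cons_self .., by rw [hcv]; ring⟩
      · obtain ⟨u, hu, hau⟩ := (ih hsd).mp ha0
        refine ⟨u, List.mem_cons_of_mem _ ((List.dropWhile_sublist _).mem hu), ?_⟩
        rw [hau]
        congr 1
        have := hcu u hu
        omega
    · rintro ⟨u, hu, rfl⟩
      rw [pvG]
      rcases List.mem_cons.mp hu with rfl | hut
      · apply List.mem_cons.mpr; left
        rw [hcv]; ring
      · by_cases huv : u = v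
        · subst huv
          apply List.mem_cons.mpr; left
          rw [hcv]; ring
        · have hud : u ∈ t.dropWhile (· == v) := by
            have hm2 : u ∈ t.takeWhile (· == v) ++ t.dropWhile (· == v) := by rw [← hsplit]; exact hut
            rcases List.mem_append.mp hm2 with h | h
            · exact absurd (htw u h) huv
            · exact h
          apply List.mem_cons.mpr; right
          apply (ih hsd).mpr
          refine ⟨u, hud, ?_⟩
          congr 1
          have := hcu u hud
          omega


-- A-side: the counting loop is PySem.Dict.counter
theorem pv_modify_absent {d : PySem.Dict Int Int} {k : Int} (h : ¬ d.contains k = true) :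
    d.modify k 0 (· + 1) = d.insert k 1 := by
  have hg : d.get? k = none := (PySem.Dict.get?_eq_none_iff_contains d k).mpr (by simpa using h)
  simp [PySem.Dict.modify, PySem.Dict.getD, hg]

theorem pv_fold_counter (arr : List Int) :
    arr.foldl (fun c val => if ¬ c.contains val then c.insert val 1
      else c.modify val 0 (· + 1)) PySem.Dict.empty = PySem.Dict.counter arr := by
  rw [PySem.Dict.counter_eq_foldl]
  congr 1
  funext c val
  by_cases h : c.contains val = true
  · simp [h]
  · simp [h, pv_modify_absent h]

theorem pv_foldl_append_map (l : List (Int × Int)) (acc : List Int) :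
    l.foldl (fun a kv => a ++ [kv.1 + kv.2]) acc = acc ++ l.map (fun kv => kv.1 + kv.2) := by
  induction l generalizing acc with
  | nil => simp
  | cons x xs ih => simp [ih]

theorem pv_max_ext (l1 l2 : List Int) (h1 : l1 ≠ []) (h2 : l2 ≠ [])
    (hm : ∀ a, a ∈ l1 ↔ a ∈ l2) :
    (PySem.List.max? l1 (fun x => x)).getD 0 = (PySem.List.max? l2 (fun x => x)).getD 0 := by
  rcases hm1 : PySem.List.max? l1 (fun x => x) with _ | m1
  · exact absurd ((PySem.List.max?_eq_none_iff l1 _).mp hm1) h1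
  rcases hm2 : PySem.List.max? l2 (fun x => x) with _ | m2
  · exact absurd ((PySem.List.max?_eq_none_iff l2 _).mp hm2) h2
  have e1 : m1 ≤ m2 := PySem.List.max?_isMax hm2 m1 ((hm m1).mp (PySem.List.max?_mem hm1))
  have e2 : m2 ≤ m1 := PySem.List.max?_isMax hm1 m2 ((hm m2).mpr (PySem.List.max?_mem hm2))
  simp [le_antisymm e1 e2]

-- ===== VERDICT (by name: the statement is the Claim_ definition above) =====
theorem pv_mem_map_count (arr : List Int) (a : Int) :
    a ∈ (PySem.Set.ofList arr).map (fun k => k + (arr.count k : Int)) ↔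
      ∃ v ∈ arr, a = v + (arr.count v : Int) := by
  simp only [List.mem_map]
  constructor
  · rintro ⟨v, hv, rfl⟩
    exact ⟨v, (PySem.Set.mem_ofList arr v).mp hv, rfl⟩
  · rintro ⟨v, hv, rfl⟩
    exact ⟨v, (PySem.Set.mem_ofList arr v).mpr hv, rfl⟩

-- ===== VERDICT (by name: the statement is the Claim_ definition above) =====
theorem solution_spec : Claim_equal_solution := by
  intro arr _ hpre
  unfold Spec_solution solution solution_alt
  simp only [pv_fold_counter, PySem.Dict.items_counter, pv_foldl_append_map, List.nil_append,
      List.map_map, runScan_eq, List.drop_zero]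
  have hpair : (PySem.List.sorted arr (fun x => x)).Pairwise (· ≤ ·) :=
    PySem.List.sorted_pairwise arr (fun x => x)
  have hperm := PySem.List.sorted_perm arr (fun x => x) false
  apply pv_max_ext
  · intro hnil
    rcases hne : PySem.Set.ofList arr with _ | ⟨x, xs⟩
    · rcases hp : arr with _ | ⟨y, ys⟩
      · exact hpre hp
      · have : y ∈ PySem.Set.ofList arr := (PySem.Set.mem_ofList arr y).mpr (by rw [hp]; simp)
        rw [hne] at this; simp at this
    · rw [hne] at hnil; simp at hnil
  · intro hnil
    rcases hs : PySem.List.sorted arr (fun x => x) with _ | ⟨x, xs⟩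
    · exact hpre ((PySem.List.sorted_eq_nil_iff arr _ _).mp hs)
    · rw [hs, pvG] at hnil; simp at hnil
  · intro a
    have hcomp : ((fun kv => kv.1 + kv.2 : Int × Int → Int) ∘ fun k => (k, (arr.count k : Int)))
        = fun k => k + (arr.count k : Int) := rfl
    rw [hcomp, pv_mem_map_count, mem_pvG _ hpair a]
    constructor
    · rintro ⟨v, hv, rfl⟩
      refine ⟨v, (PySem.List.mem_sorted arr _ _ v).mpr hv, ?_⟩
      rw [hperm.count_eq]
    · rintro ⟨v, hv, rfl⟩
      refine ⟨v, (PySem.List.mem_sorted arr _ _ v).mp hv, ?_⟩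
      rw [hperm.count_eq]
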